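-- pv_equiv track=rewrite | github.com/OlgaAlekhina/algorithms | minimizeXOR.py | minimize_XOR
-- ===== SOURCE A (Python) =====
-- def minimize_XOR(num1: int, num2: int) -> int:
--     set_bits1, set_bits2, a, b = 0, 0, num1, num2
--     while a:
--         if a & 1 == 1:
--             set_bits1 += 1
--         a >>= 1
--     while b:
--         if b & 1 == 1:
--             set_bits2 += 1
--         b >>= 1
--     if set_bits1 == set_bits2:
--         return num1
--     num1_list = list(bin(num1).split('b')[1])
--     if set_bits2 >= len(num1_list):
--         return int('1' * set_bits2, 2)
--     for i in range(len(num1_list)):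
--         if num1_list[i] == '1' and set_bits2 > 0:
--             set_bits2 -= 1
--         else:
--             num1_list[i] = '0'
--     if set_bits2:
--         for i in range(len(num1_list) - 1, -1, -1):
--             if num1_list[i] == '0':
--                 num1_list[i] = '1'
--                 set_bits2 -= 1
--             if set_bits2 == 0:
--                 break
--     return int(''.join(num1_list), 2)
-- ===== SOURCE B (Python) =====
-- def minimize_XOR(num1: int, num2: int) -> int:
--     def popcount(n):
--         c = 0
--         while n:
--             n &= n - 1
--             c += 1
--         return c
--     c1 = popcount(num1)
--     c2 = popcount(num2)
--     x = num1
--     while c1 < c2: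
--         x |= x + 1
--         c1 += 1
--     while c1 > c2:
--         x &= x - 1
--         c1 -= 1
--     return x
-- ===== Notes on version B (the rewrite author's own statement) =====
-- stated objective: simpler
-- what changed: Replaces A's binary-string construction and two positional passes over the digit list with a difference-driven bit-adjustment loop: compute both popcounts, then repeat x |= x+1 (set lowest clear bit) or x &= x-1 (clear lowest set bit) |c1-c2| times.
import Mathlib
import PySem

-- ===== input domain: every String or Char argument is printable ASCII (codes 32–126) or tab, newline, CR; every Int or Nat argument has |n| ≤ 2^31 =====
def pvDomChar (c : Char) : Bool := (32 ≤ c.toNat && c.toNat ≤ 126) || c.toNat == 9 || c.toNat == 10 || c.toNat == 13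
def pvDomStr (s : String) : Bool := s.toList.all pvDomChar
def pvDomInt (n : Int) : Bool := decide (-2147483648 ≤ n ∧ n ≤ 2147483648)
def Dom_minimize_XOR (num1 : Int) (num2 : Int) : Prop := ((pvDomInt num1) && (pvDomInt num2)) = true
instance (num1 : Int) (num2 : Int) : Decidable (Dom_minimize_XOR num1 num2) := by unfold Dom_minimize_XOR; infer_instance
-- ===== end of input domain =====

-- B replaces A's binary-string construction and two positional digit-list passes by a
-- difference-driven bit-adjustment loop (|c1-c2| times set lowest clear / clear lowest set bit);
-- objective: simpler.

-- ===== PORT A =====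

-- Python's `while a: ... a >>= 1` popcount loop; it diverges for a < 0 (excluded by Pre_),
-- so the loop is ported on `.toNat`, where `a & 1` and `a >>= 1` are `&&& 1` and `>>> 1` — exact for a ≥ 0.
def countLoop (a : Nat) (acc : Int) : Int :=
  if a = 0 then acc
  else countLoop (a >>> 1) (if a &&& 1 = 1 then acc + 1 else acc)
  termination_by a
  decreasing_by simp only [Nat.shiftRight_one]; omega

-- `for i in range(len(num1_list)): ...` first pass, returning the rewritten list and the final set_bits2.
def pass1 : List Char → Int → List Char × Int
  | [], k => ([], k)
  | c :: rest, k =>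
    if c = '1' ∧ 0 < k then
      let p := pass1 rest (k - 1)
      ('1' :: p.1, p.2)
    else
      let p := pass1 rest k
      ('0' :: p.1, p.2)

-- second pass `for i in range(len(num1_list)-1, -1, -1): ... break`, ported on the REVERSED list
-- (it walks from the last index towards the front and stops when set_bits2 hits 0).
def pass2 : List Char → Int → List Char
  | [], _ => []
  | c :: rest, k =>
    if c = '0' then
      if k - 1 = 0 then '1' :: rest else '1' :: pass2 rest (k - 1)
    else
      if k = 0 then c :: rest else c :: pass2 rest k

-- int(s, 2): exact for the nonempty '0'/'1' digit lists A builds here (no sign/space/underscore/prefix).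
def parseBin (l : List Char) : Nat :=
  l.foldl (fun acc c => 2 * acc + (if c = '1' then 1 else 0)) 0

def minimize_XOR (num1 : Int) (num2 : Int) : Int :=
  let set_bits1 := countLoop num1.toNat 0
  let set_bits2 := countLoop num2.toNat 0
  if set_bits1 = set_bits2 then num1
  else
    -- list(bin(num1).split('b')[1]) = the plain binary digits of num1, for num1 ≥ 0 (Pre_)
    let num1_list := PySem.Int.toBinChars num1
    if (num1_list.length : Int) ≤ set_bits2 then
      (parseBin (List.replicate set_bits2.toNat '1') : Int)   -- int('1' * set_bits2, 2)
    else
      let p := pass1 num1_list set_bits2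
      let l2 := if p.2 ≠ 0 then (pass2 p.1.reverse p.2).reverse else p.1
      (parseBin l2 : Int)

-- ===== PORT B =====

-- popcount: `while n: n &= n - 1; c += 1`; diverges for n < 0 (excluded by Pre_), guard `x ≤ 0` exits there.
def kern (x : Int) (c : Int) : Int :=
  if h : x ≤ 0 then c else kern (PySem.Int.band x (x - 1)) (c + 1)
  termination_by x.toNat
  decreasing_by
    rw [PySem.Int.band_of_nonneg (by omega) (by omega)]
    have := Nat.and_le_right (n := x.toNat) (m := (x - 1).toNat)
    omega

-- `while c1 < c2: x |= x + 1; c1 += 1` — runs (c2 - c1) times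
def bRaise (x : Int) : Nat → Int
  | 0 => x
  | j + 1 => bRaise (PySem.Int.bor x (x + 1)) j

-- `while c1 > c2: x &= x - 1; c1 -= 1` — runs (c1 - c2) times
def bLower (x : Int) : Nat → Int
  | 0 => x
  | j + 1 => bLower (PySem.Int.band x (x - 1)) j

def minimize_XOR_alt (num1 : Int) (num2 : Int) : Int :=
  let c1 := kern num1 0
  let c2 := kern num2 0
  let x := bRaise num1 (c2 - c1).toNat
  bLower x (c1 - c2).toNat

-- ===== PRECONDITION & SPEC =====
-- Pre_ excludes exactly the negative inputs: on num1 < 0 or num2 < 0 Python A's first or second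
-- `while a: ... a >>= 1` loop never terminates (A never returns a value there).
def Pre_minimize_XOR (num1 : Int) (num2 : Int) : Prop := 0 ≤ num1 ∧ 0 ≤ num2
instance (num1 : Int) (num2 : Int) : Decidable (Pre_minimize_XOR num1 num2) := by
  unfold Pre_minimize_XOR; infer_instance

def pvWitness_minimize_XOR : Int × Int := (5, 3)

def Spec_minimize_XOR (num1 : Int) (num2 : Int) (out : Int) : Prop := out = minimize_XOR_alt num1 num2
instance (num1 : Int) (num2 : Int) (out : Int) : Decidable (Spec_minimize_XOR num1 num2 out) := by
  unfold Spec_minimize_XOR; infer_instance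

-- ===== CLAIM (what is proved, stated in full; the proofs are below) =====
def Claim_equal_minimize_XOR : Prop := ∀ (num1 : Int) (num2 : Int), Dom_minimize_XOR num1 num2 → Pre_minimize_XOR num1 num2 → Spec_minimize_XOR num1 num2 (minimize_XOR num1 num2)

-- ===== LEMMAS AND PROOFS =====

-- ---- proof-side vocabulary: little-endian binary digit lists ----

def IsBin (l : List Char) : Prop := ∀ c ∈ l, c = '0' ∨ c = '1'

-- value of a little-endian (LSB-first) '0'/'1' list
def parseLE : List Char → Nat
  | [] => 0
  | c :: r => (if c = '1' then 1 else 0) + 2 * parseLE r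

-- clear the lowest set bit
def clr : List Char → List Char
  | [] => []
  | c :: r => if c = '1' then '0' :: r else c :: clr r

-- set the lowest clear bit (appending a new top bit if there is none)
def szo : List Char → List Char
  | [] => ['1']
  | c :: r => if c = '0' then '1' :: r else c :: szo r

def clrN : List Char → Nat → List Char
  | r, 0 => r
  | r, j + 1 => clrN (clr r) j

def szoN : List Char → Nat → List Char
  | r, 0 => r
  | r, j + 1 => szoN (szo r) j

-- zero the lowest j set bits (all at once)
def zlo : List Char → Nat → List Char
  | [], _ => []
  | c :: r, j => if c = '1' ∧ 0 < j then '0' :: zlo r (j - 1) else c :: zlo r j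

-- set the lowest j clear bits (all at once)
def slz : List Char → Nat → List Char
  | [], _ => []
  | c :: r, j => if c = '0' ∧ 0 < j then '1' :: slz r (j - 1) else c :: slz r j

-- canonical popcount
def pcN (n : Nat) : Nat :=
  if n = 0 then 0 else n % 2 + pcN (n / 2)
  termination_by n
  decreasing_by omega

-- ---- basic facts ----

theorem countLoop_eq (n : Nat) (acc : Int) : countLoop n acc = acc + (pcN n : Int) := by
  induction n using Nat.strong_induction_on generalizing acc with
  | _ n ih =>
    rw [countLoop, pcN]
    by_cases h : n = 0
    · simp [h]
    · simp only [if_neg h]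
      rw [ih (n >>> 1) (by simp only [Nat.shiftRight_one]; omega)]
      rw [Nat.and_one_is_mod, Nat.shiftRight_one]
      rcases Nat.mod_two_eq_zero_or_one n with h2 | h2 <;> simp [h2] <;> push_cast <;> ring

theorem pcN_zero : pcN 0 = 0 := by rw [pcN]; simp

-- toDigitsCore unfolding: with enough fuel it is the clean MSB-first recursion
def bd (n : Nat) : List Char :=
  if n < 2 then [Nat.digitChar n] else bd (n / 2) ++ [Nat.digitChar (n % 2)]
  termination_by n
  decreasing_by omega

theorem toDigitsCore_eq_bd (f : Nat) : ∀ n ds, n < f →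
    Nat.toDigitsCore 2 f n ds = bd n ++ ds := by
  induction f with
  | zero => intro n ds h; omega
  | succ f ih =>
    intro n ds h
    rw [bd]
    simp only [Nat.toDigitsCore]
    by_cases h2 : n / 2 = 0
    · have hn2 : n < 2 := by omega
      have h3 : n % 2 = n := Nat.mod_eq_of_lt hn2
      simp [h2, h3, show n ≤ 1 by omega]
    · have hn2 : ¬ n < 2 := by omega
      simp only [h2, if_neg hn2, if_neg h2]
      rw [ih (n / 2) _ (by omega)]
      simp

theorem toDigits_eq_bd (n : Nat) : Nat.toDigits 2 n = bd n := by
  have : Nat.toDigits 2 n = Nat.toDigitsCore 2 (n + 1) n [] := rfl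
  rw [this, toDigitsCore_eq_bd (n + 1) n [] (by omega), List.append_nil]

theorem parseBin_append_singleton (l : List Char) (c : Char) :
    parseBin (l ++ [c]) = 2 * parseBin l + (if c = '1' then 1 else 0) := by
  simp [parseBin, List.foldl_append]

theorem parseBin_eq_parseLE (l : List Char) : parseBin l = parseLE l.reverse := by
  induction l using List.reverseRecOn with
  | nil => rfl
  | append_singleton l c ih =>
    rw [parseBin_append_singleton, List.reverse_append]
    simp [parseLE, ih]; ring

theorem parseBin_bd (n : Nat) : parseBin (bd n) = n := by
  induction n using Nat.strong_induction_on with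
  | _ n ih =>
    rw [bd]
    by_cases h : n < 2
    · interval_cases n <;> decide
    · rw [if_neg h, parseBin_append_singleton, ih (n / 2) (by omega)]
      rcases Nat.mod_two_eq_zero_or_one n with h2 | h2 <;>
        simp [h2, Nat.digitChar] <;> omega

theorem count_bd (n : Nat) : (bd n).count '1' = pcN n := by
  induction n using Nat.strong_induction_on with
  | _ n ih =>
    rw [bd, pcN]
    by_cases h : n < 2
    · interval_cases n <;> simp [Nat.digitChar, pcN_zero]
    · rw [if_neg h, if_neg (by omega : ¬ n = 0), List.count_append, ih (n / 2) (by omega)]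
      rcases Nat.mod_two_eq_zero_or_one n with h2 | h2 <;>
        simp [h2, Nat.digitChar] <;> omega

theorem isBin_bd (n : Nat) : IsBin (bd n) := by
  induction n using Nat.strong_induction_on with
  | _ n ih =>
    rw [bd]
    by_cases h : n < 2
    · intro c hc
      interval_cases n <;> simp [Nat.digitChar] at hc <;> simp [hc]
    · rw [if_neg h]
      intro c hc
      rcases List.mem_append.mp hc with hc | hc
      · exact ih (n / 2) (by omega) c hc
      · rcases Nat.mod_two_eq_zero_or_one n with h2 | h2 <;>
          simp [h2, Nat.digitChar] at hc <;> simp [hc]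

theorem length_bd_pos (n : Nat) : 0 < (bd n).length := by
  rw [bd]; split <;> simp

theorem ones_add_zeros (r : List Char) (hb : IsBin r) :
    r.count '1' + r.count '0' = r.length := by
  induction r with
  | nil => rfl
  | cons c r ih =>
    have hc := hb c List.mem_cons_self
    have hr : IsBin r := fun d hd => hb d (List.mem_cons_of_mem c hd)
    have hih := ih hr
    rcases hc with hc | hc <;> subst hc <;>
      simp only [List.count_cons, List.length_cons] <;> simp <;> omega

theorem parseLE_pos (r : List Char) (h1 : '1' ∈ r) : 1 ≤ parseLE r := by
  induction r with
  | nil => simp at h1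
  | cons c r ih =>
    rw [parseLE]
    rcases List.mem_cons.mp h1 with hc | hc
    · simp [hc.symm]
    · have := ih hc; omega

theorem parseLE_eq_zero (r : List Char) (h1 : '1' ∉ r) : parseLE r = 0 := by
  induction r with
  | nil => rfl
  | cons c r ih =>
    rw [parseLE]
    have hc : ¬ c = '1' := fun h => h1 (h ▸ List.mem_cons_self)
    have hr : '1' ∉ r := fun h => h1 (List.mem_cons_of_mem c h)
    simp [hc, ih hr]

theorem parseLE_replicate_one (c : Nat) : parseLE (List.replicate c '1') = 2 ^ c - 1 := by
  induction c with
  | zero => rfl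
  | succ c ih =>
    rw [List.replicate_succ, parseLE, ih]
    have : 1 ≤ 2 ^ c := Nat.one_le_two_pow
    rw [pow_succ, if_pos rfl]; omega

-- ---- bitwise pair lemmas ----

theorem land_pair (x y : Bool) (a b : Nat) :
    (2 * a + x.toNat) &&& (2 * b + y.toNat) = 2 * (a &&& b) + (x && y).toNat := by
  have e : ∀ p q : Nat, p &&& q = Nat.bitwise and p q := fun _ _ => rfl
  have h := Nat.bitwise_bit (f := and) rfl x a y b
  rw [Nat.bit_val, Nat.bit_val, Nat.bit_val] at h
  rw [e, e, h]

theorem lor_pair (x y : Bool) (a b : Nat) :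
    (2 * a + x.toNat) ||| (2 * b + y.toNat) = 2 * (a ||| b) + (x || y).toNat := by
  have e : ∀ p q : Nat, p ||| q = Nat.bitwise or p q := fun _ _ => rfl
  have h := Nat.bitwise_bit (f := or) rfl x a y b
  rw [Nat.bit_val, Nat.bit_val, Nat.bit_val] at h
  rw [e, e, h]

-- ---- clr / szo vs arithmetic ----

theorem isBin_clr (r : List Char) (hb : IsBin r) : IsBin (clr r) := by
  induction r with
  | nil => exact hb
  | cons c r ih =>
    have hr : IsBin r := fun d hd => hb d (List.mem_cons_of_mem c hd)
    rw [clr]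
    split
    · intro d hd
      rcases List.mem_cons.mp hd with h | h
      · simp [h]
      · exact hr d h
    · intro d hd
      rcases List.mem_cons.mp hd with h | h
      · exact hb d (h ▸ List.mem_cons_self)
      · exact ih hr d h

theorem isBin_szo (r : List Char) (hb : IsBin r) : IsBin (szo r) := by
  induction r with
  | nil => intro d hd; simp [szo] at hd; simp [hd]
  | cons c r ih =>
    have hr : IsBin r := fun d hd => hb d (List.mem_cons_of_mem c hd)
    rw [szo]
    split
    · intro d hd
      rcases List.mem_cons.mp hd with h | h
      · simp [h]
      · exact hr d h
    · intro d hd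
      rcases List.mem_cons.mp hd with h | h
      · exact hb d (h ▸ List.mem_cons_self)
      · exact ih hr d h

theorem count_clr (r : List Char) (hb : IsBin r) (h1 : '1' ∈ r) :
    (clr r).count '1' + 1 = r.count '1' := by
  induction r with
  | nil => simp at h1
  | cons c r ih =>
    have hr : IsBin r := fun d hd => hb d (List.mem_cons_of_mem c hd)
    rw [clr]
    by_cases hc : c = '1'
    · rw [if_pos hc, hc]; simp [List.count_cons]
    · rw [if_neg hc]
      have h1' : '1' ∈ r := by
        rcases List.mem_cons.mp h1 with h | h
        · exact absurd h.symm hc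
        · exact h
      simp only [List.count_cons]
      rw [← ih hr h1']
      omega

theorem count_szo (r : List Char) (h0 : '0' ∈ r) :
    (szo r).count '0' + 1 = r.count '0' := by
  induction r with
  | nil => simp at h0
  | cons c r ih =>
    rw [szo]
    by_cases hc : c = '0'
    · rw [if_pos hc, hc]; simp [List.count_cons]
    · rw [if_neg hc]
      have h0' : '0' ∈ r := by
        rcases List.mem_cons.mp h0 with h | h
        · exact absurd h.symm hc
        · exact h
      simp only [List.count_cons]
      rw [← ih h0']
      omega

theorem land_pred (r : List Char) (hb : IsBin r) (h1 : '1' ∈ r) :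
    parseLE r &&& (parseLE r - 1) = parseLE (clr r) := by
  induction r with
  | nil => simp at h1
  | cons c r ih =>
    have hr : IsBin r := fun d hd => hb d (List.mem_cons_of_mem c hd)
    rw [clr]
    by_cases hc : c = '1'
    · rw [if_pos hc]
      simp only [parseLE, if_pos hc, if_neg (by decide : ¬ ('0' : Char) = '1')]
      have h := land_pair true false (parseLE r) (parseLE r)
      simp only [Bool.toNat_true, Bool.toNat_false, Bool.and_false, add_zero] at h
      rw [Nat.and_self] at h
      have e1 : (1 : Nat) + 2 * parseLE r = 2 * parseLE r + 1 := by omega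
      have e2 : 2 * parseLE r + 1 - 1 = 2 * parseLE r := by omega
      rw [e1, e2, h]
      omega
    · rw [if_neg hc]
      have hc0 : c = '0' := by
        rcases hb c List.mem_cons_self with h | h
        · exact h
        · exact absurd h hc
      have h1' : '1' ∈ r := by
        rcases List.mem_cons.mp h1 with h | h
        · exact absurd h.symm hc
        · exact h
      have hu : 1 ≤ parseLE r := parseLE_pos r h1'
      simp only [parseLE, if_neg hc]
      have h := land_pair false true (parseLE r) (parseLE r - 1)
      simp only [Bool.toNat_true, Bool.toNat_false, Bool.and_true, Bool.false_and, add_zero] at h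
      simp only [zero_add]
      have e2 : 2 * parseLE r - 1 = 2 * (parseLE r - 1) + 1 := by omega
      rw [e2, h, ih hr h1']

theorem lor_succ (r : List Char) (hb : IsBin r) :
    parseLE r ||| (parseLE r + 1) = parseLE (szo r) := by
  induction r with
  | nil => decide
  | cons c r ih =>
    have hr : IsBin r := fun d hd => hb d (List.mem_cons_of_mem c hd)
    rw [szo]
    by_cases hc : c = '0'
    · rw [if_pos hc]
      simp only [parseLE, if_neg (show ¬ c = '1' by rw [hc]; decide),
        if_pos (rfl : ('1' : Char) = '1')]
      have h := lor_pair false true (parseLE r) (parseLE r)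
      simp only [Bool.toNat_true, Bool.toNat_false, Bool.or_true, add_zero] at h
      rw [Nat.or_self] at h
      simp only [zero_add, reduceIte]
      rw [h]
      omega
    · have hc1 : c = '1' := by
        rcases hb c List.mem_cons_self with h | h
        · exact absurd h hc
        · exact h
      rw [if_neg hc]
      simp only [parseLE, if_pos hc1]
      have h := lor_pair true false (parseLE r) (parseLE r + 1)
      simp only [Bool.toNat_true, Bool.toNat_false, Bool.true_or, add_zero] at h
      have e1 : (1:Nat) + 2 * parseLE r = 2 * parseLE r + 1 := by omega
      rw [e1]
      have e2 : 2 * parseLE r + 1 + 1 = 2 * (parseLE r + 1) := by omega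
      rw [e2] at *
      rw [h, ih hr]
      omega

-- Int versions used by the B-side loops
theorem band_step (r : List Char) (hb : IsBin r) (h1 : '1' ∈ r) :
    PySem.Int.band (parseLE r : Int) ((parseLE r : Int) - 1) = (parseLE (clr r) : Int) := by
  have hu : 1 ≤ parseLE r := parseLE_pos r h1
  rw [show ((parseLE r : Int) - 1) = ((parseLE r - 1 : Nat) : Int) by omega,
      PySem.Int.band_natCast, land_pred r hb h1]

theorem bor_step (r : List Char) (hb : IsBin r) :
    PySem.Int.bor (parseLE r : Int) ((parseLE r : Int) + 1) = (parseLE (szo r) : Int) := by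
  rw [show ((parseLE r : Int) + 1) = ((parseLE r + 1 : Nat) : Int) by omega,
      PySem.Int.bor_natCast, lor_succ r hb]

theorem kern_eq (m : Nat) : ∀ (r : List Char) (c : Int), IsBin r → r.count '1' = m →
    kern (parseLE r : Int) c = c + (m : Int) := by
  induction m with
  | zero =>
    intro r c hb hm
    have h1 : '1' ∉ r := by
      intro h
      have := List.count_pos_iff.mpr h
      omega
    rw [parseLE_eq_zero r h1, kern]
    simp
  | succ m ih =>
    intro r c hb hm
    have h1 : '1' ∈ r := List.count_pos_iff.mp (by omega)
    have hu : 1 ≤ parseLE r := parseLE_pos r h1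
    rw [kern, dif_neg (by omega : ¬ (parseLE r : Int) ≤ 0), band_step r hb h1,
        ih (clr r) (c + 1) (isBin_clr r hb) (by have := count_clr r hb h1; omega)]
    push_cast
    ring

theorem bLower_eq (j : Nat) : ∀ (r : List Char), IsBin r → j ≤ r.count '1' →
    bLower (parseLE r : Int) j = (parseLE (clrN r j) : Int) := by
  induction j with
  | zero => intro r _ _; rfl
  | succ j ih =>
    intro r hb hj
    have h1 : '1' ∈ r := List.count_pos_iff.mp (by omega)
    rw [bLower, band_step r hb h1, clrN,
        ih (clr r) (isBin_clr r hb) (by have := count_clr r hb h1; omega)]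

theorem bRaise_eq (j : Nat) : ∀ (r : List Char), IsBin r →
    bRaise (parseLE r : Int) j = (parseLE (szoN r j) : Int) := by
  induction j with
  | zero => intro r _; rfl
  | succ j ih =>
    intro r hb
    rw [bRaise, bor_step r hb, szoN, ih (szo r) (isBin_szo r hb)]

-- ---- pass1 / pass2 vs zlo / slz / clrN / szoN ----

theorem zlo_zero (r : List Char) : zlo r 0 = r := by
  induction r with
  | nil => rfl
  | cons c r ih => rw [zlo]; simp [ih]

theorem slz_zero (r : List Char) : slz r 0 = r := by
  induction r with
  | nil => rfl
  | cons c r ih => rw [slz]; simp [ih]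

theorem zlo_append_le (c : Char) : ∀ (r : List Char) (j : Nat), j ≤ r.count '1' →
    zlo (r ++ [c]) j = zlo r j ++ [c] := by
  intro r
  induction r with
  | nil =>
    intro j hj
    simp only [List.count_nil, Nat.le_zero] at hj
    subst hj
    rw [List.nil_append, zlo_zero, zlo_zero, List.nil_append]
  | cons d r ih =>
    intro j hj
    rw [List.cons_append, zlo, zlo]
    by_cases hd : d = '1' ∧ 0 < j
    · have hj' : j - 1 ≤ r.count '1' := by
        simp [List.count_cons, hd.1] at hj; omega
      rw [if_pos hd, if_pos hd, ih (j - 1) hj']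
      simp
    · have hj' : j ≤ r.count '1' := by
        by_cases h1 : d = '1'
        · have hj0 : j = 0 := by
            rcases Nat.eq_zero_or_pos j with h | h
            · exact h
            · exact absurd ⟨h1, h⟩ hd
          omega
        · simp [List.count_cons, h1] at hj; omega
      rw [if_neg hd, if_neg hd, ih j hj']
      simp

theorem zlo_append_top : ∀ (r : List Char),
    zlo (r ++ ['1']) (r.count '1' + 1) = zlo r (r.count '1') ++ ['0'] := by
  intro r
  induction r with
  | nil => rfl
  | cons d r ih =>
    rw [List.cons_append, zlo, zlo]
    by_cases hd : d = '1'
    · have hcnt : (d :: r).count '1' = r.count '1' + 1 := by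
        simp [List.count_cons, hd]
      rw [hcnt, if_pos ⟨hd, by omega⟩, if_pos ⟨hd, by omega⟩]
      simp only [Nat.add_sub_cancel]
      rw [ih]
      simp
    · have hcnt : (d :: r).count '1' = r.count '1' := by
        simp [List.count_cons, hd]
      rw [hcnt, if_neg (fun h => hd h.1), if_neg (fun h => hd h.1), ih]
      simp

theorem pass1_all : ∀ (l : List Char) (k : Int), IsBin l → (l.count '1' : Int) ≤ k →
    pass1 l k = (l, k - (l.count '1' : Int)) := by
  intro l
  induction l with
  | nil => intro k _ _; simp [pass1]
  | cons c l ih =>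
    intro k hb hk
    have hl : IsBin l := fun d hd => hb d (List.mem_cons_of_mem c hd)
    rw [pass1]
    rcases hb c List.mem_cons_self with hc | hc
    · have hcnt : (c :: l).count '1' = l.count '1' := by
        simp [List.count_cons, hc]
      rw [hcnt] at hk ⊢
      rw [if_neg (by rw [hc]; rintro ⟨h, -⟩; exact absurd h (by decide))]
      rw [ih k hl hk]
      simp [hc]
    · have hcnt : (c :: l).count '1' = l.count '1' + 1 := by
        simp [List.count_cons, hc]
      rw [hcnt] at hk ⊢
      rw [if_pos ⟨hc, by push_cast at hk ⊢; omega⟩]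
      rw [ih (k - 1) hl (by push_cast at hk ⊢; omega)]
      simp only [Prod.mk.injEq]
      exact ⟨by rw [hc], by push_cast; ring⟩

theorem pass1_zlo : ∀ (l : List Char) (k : Nat), IsBin l → k ≤ l.count '1' →
    (pass1 l (k : Int)).1.reverse = zlo l.reverse (l.count '1' - k) ∧ (pass1 l (k : Int)).2 = 0 := by
  intro l
  induction l with
  | nil =>
    intro k _ hk
    simp only [List.count_nil, Nat.le_zero] at hk
    subst hk
    simp [pass1, zlo]
  | cons c l ih =>
    intro k hb hk
    have hl : IsBin l := fun d hd => hb d (List.mem_cons_of_mem c hd)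
    have hcr : l.reverse.count '1' = l.count '1' := List.count_reverse ..
    rw [pass1]
    rcases hb c List.mem_cons_self with hc | hc
    · -- c = '0'
      have hcnt : (c :: l).count '1' = l.count '1' := by
        simp [List.count_cons, hc]
      rw [hcnt] at hk ⊢
      rw [if_neg (by rw [hc]; rintro ⟨h, -⟩; exact absurd h (by decide))]
      obtain ⟨h1, h2⟩ := ih k hl hk
      refine ⟨?_, h2⟩
      simp only [List.reverse_cons]
      rw [zlo_append_le c l.reverse (l.count '1' - k) (by rw [hcr]; omega), ← h1, hc]
    · -- c = '1'
      have hcnt : (c :: l).count '1' = l.count '1' + 1 := by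
        simp [List.count_cons, hc]
      rw [hcnt] at hk ⊢
      by_cases hk0 : 0 < k
      · rw [if_pos ⟨hc, by exact_mod_cast hk0⟩]
        have he : ((k : Int) - 1) = ((k - 1 : Nat) : Int) := by push_cast; omega
        rw [he]
        obtain ⟨h1, h2⟩ := ih (k - 1) hl (by omega)
        refine ⟨?_, h2⟩
        simp only [List.reverse_cons]
        rw [hc, zlo_append_le '1' l.reverse (l.count '1' + 1 - k) (by rw [hcr]; omega),
            show l.count '1' + 1 - k = l.count '1' - (k - 1) by omega, ← h1]
      · -- k = 0
        have hk0' : k = 0 := by omega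
        subst hk0'
        rw [if_neg (by rintro ⟨-, h⟩; exact absurd h (by norm_num))]
        obtain ⟨h1, h2⟩ := ih 0 hl (by omega)
        refine ⟨?_, h2⟩
        simp only [List.reverse_cons, Nat.sub_zero] at h1 ⊢
        rw [hc, show l.count '1' + 1 = l.reverse.count '1' + 1 by rw [hcr],
            zlo_append_top l.reverse, hcr, ← h1]

theorem zlo_clr_step (j : Nat) : ∀ (r : List Char), '1' ∈ r →
    zlo (clr r) j = zlo r (j + 1) := by
  intro r
  induction r with
  | nil => intro h; simp at h
  | cons c r ih =>
    intro h
    rw [clr]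
    by_cases hc : c = '1'
    · rw [if_pos hc, zlo, zlo]
      rw [if_neg (by rintro ⟨h0, -⟩; exact absurd h0 (by decide)),
          if_pos ⟨hc, by omega⟩]
      simp
    · have h1 : '1' ∈ r := by
        rcases List.mem_cons.mp h with h' | h'
        · exact absurd h'.symm hc
        · exact h'
      rw [if_neg hc, zlo, zlo]
      rw [if_neg (fun hx => hc hx.1), if_neg (fun hx => hc hx.1), ih h1]

theorem clrN_eq_zlo (j : Nat) : ∀ (r : List Char), IsBin r → j ≤ r.count '1' →
    clrN r j = zlo r j := by
  induction j with
  | zero => intro r _ _; rw [clrN, zlo_zero]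
  | succ j ih =>
    intro r hb hj
    have h1 : '1' ∈ r := List.count_pos_iff.mp (by omega)
    rw [clrN, ih (clr r) (isBin_clr r hb) (by have := count_clr r hb h1; omega),
        zlo_clr_step j r h1]

theorem pass2_eq_slz : ∀ (r : List Char) (k : Int), 1 ≤ k →
    pass2 r k = slz r k.toNat := by
  intro r
  induction r with
  | nil => intro k _; rfl
  | cons c r ih =>
    intro k hk
    by_cases hc : c = '0'
    · by_cases hk1 : k - 1 = 0
      · rw [pass2, if_pos hc, if_pos hk1, slz,
            if_pos (show c = '0' ∧ 0 < k.toNat from ⟨hc, by omega⟩),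
            show k.toNat - 1 = 0 by omega, slz_zero]
      · rw [pass2, if_pos hc, if_neg hk1, ih (k - 1) (by omega), slz,
            if_pos (show c = '0' ∧ 0 < k.toNat from ⟨hc, by omega⟩),
            show (k - 1).toNat = k.toNat - 1 by omega]
    · rw [pass2, if_neg hc, if_neg (by omega : ¬ k = 0), ih k hk, slz,
          if_neg (show ¬ (c = '0' ∧ 0 < k.toNat) from fun hx => hc hx.1)]

theorem slz_szo_step (j : Nat) : ∀ (r : List Char), '0' ∈ r →
    slz (szo r) j = slz r (j + 1) := by
  intro r
  induction r with
  | nil => intro h; simp at h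
  | cons c r ih =>
    intro h
    rw [szo]
    by_cases hc : c = '0'
    · rw [if_pos hc, slz, slz]
      rw [if_neg (by rintro ⟨h0, -⟩; exact absurd h0 (by decide)),
          if_pos ⟨hc, by omega⟩]
      simp
    · have h1 : '0' ∈ r := by
        rcases List.mem_cons.mp h with h' | h'
        · exact absurd h'.symm hc
        · exact h'
      rw [if_neg hc, slz, slz]
      rw [if_neg (fun hx => hc hx.1), if_neg (fun hx => hc hx.1), ih h1]

theorem szoN_eq_slz (j : Nat) : ∀ (r : List Char), j ≤ r.count '0' →
    szoN r j = slz r j := by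
  induction j with
  | zero => intro r _; rw [szoN, slz_zero]
  | succ j ih =>
    intro r hj
    have h0 : '0' ∈ r := List.count_pos_iff.mp (by omega)
    rw [szoN, ih (szo r) (by have := count_szo r h0; omega), slz_szo_step j r h0]

theorem slz_all (r : List Char) (hb : IsBin r) :
    slz r (r.count '0') = List.replicate r.length '1' := by
  induction r with
  | nil => rfl
  | cons c r ih =>
    have hr : IsBin r := fun d hd => hb d (List.mem_cons_of_mem c hd)
    rw [slz]
    rcases hb c List.mem_cons_self with hc | hc
    · have hcnt : (c :: r).count '0' = r.count '0' + 1 := by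
        simp [List.count_cons, hc]
      rw [hcnt, if_pos ⟨hc, by omega⟩]
      simp only [Nat.add_sub_cancel]
      rw [ih hr]
      simp [List.replicate_succ]
    · have hcnt : (c :: r).count '0' = r.count '0' := by
        simp [List.count_cons, hc]
      rw [hcnt, if_neg (by rw [hc]; rintro ⟨h, -⟩; exact absurd h (by decide))]
      rw [ih hr, hc]
      simp [List.replicate_succ]

theorem szoN_add (a b : Nat) : ∀ (r : List Char), szoN r (a + b) = szoN (szoN r a) b := by
  induction a generalizing b with
  | zero => intro r; rw [szoN, Nat.zero_add]
  | succ a ih =>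
    intro r
    have h1 : szoN r (a + 1 + b) = szoN (szo r) (a + b) := by
      rw [show a + 1 + b = (a + b) + 1 by omega]
      rfl
    rw [h1, ih b (szo r)]
    rfl

theorem szo_replicate (t : Nat) : szo (List.replicate t '1') = List.replicate (t + 1) '1' := by
  induction t with
  | zero => rfl
  | succ t ih =>
    rw [List.replicate_succ, szo, if_neg (by decide), ih]
    simp [List.replicate_succ]

theorem szoN_replicate (s t : Nat) :
    szoN (List.replicate t '1') s = List.replicate (t + s) '1' := by
  induction s generalizing t with
  | zero => rw [szoN, Nat.add_zero]
  | succ s ih =>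
    rw [szoN, szo_replicate, ih (t + 1), show t + 1 + s = t + (s + 1) by omega]

-- ---- main ----

-- ===== VERDICT (by name: the statement is the Claim_ definition above) =====
theorem toBinChars_natCast (m : Nat) : PySem.Int.toBinChars (m : Int) = bd m := by
  rw [PySem.Int.toBinChars, if_neg (by omega : ¬ (m : Int) < 0),
      show ((m : Int)).toNat = m by omega, toDigits_eq_bd]

theorem minimize_XOR_spec : Claim_equal_minimize_XOR := by
  unfold Claim_equal_minimize_XOR
  intro num1 num2 _ hpre
  obtain ⟨hp1, hp2⟩ := hpre
  unfold Spec_minimize_XOR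
  obtain ⟨m, rfl⟩ : ∃ m : Nat, num1 = (m : Int) := ⟨num1.toNat, by omega⟩
  obtain ⟨n2, rfl⟩ : ∃ k : Nat, num2 = (k : Int) := ⟨num2.toNat, by omega⟩
  -- facts about num1's digit list
  have hbin_l : IsBin (bd m) := isBin_bd m
  have hbin_r : IsBin (bd m).reverse := fun c hc => hbin_l c (List.mem_reverse.mp hc)
  have hler : parseLE (bd m).reverse = m := by rw [← parseBin_eq_parseLE, parseBin_bd]
  have hcl : (bd m).count '1' = pcN m := count_bd m
  have hcr : (bd m).reverse.count '1' = pcN m := by rw [List.count_reverse, hcl]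
  have hc1L : pcN m ≤ (bd m).length := by rw [← hcl]; exact List.count_le_length
  have hLpos : 0 < (bd m).length := length_bd_pos m
  have hzeros : (bd m).reverse.count '0' = (bd m).length - pcN m := by
    have h := ones_add_zeros (bd m).reverse hbin_r
    rw [hcr, List.length_reverse] at h
    omega
  -- popcount loops on both sides
  have hA1 : countLoop ((m : Int)).toNat 0 = ((pcN m : Nat) : Int) := by
    rw [show ((m : Int)).toNat = m by omega, countLoop_eq]; simp
  have hA2 : countLoop ((n2 : Int)).toNat 0 = ((pcN n2 : Nat) : Int) := by
    rw [show ((n2 : Int)).toNat = n2 by omega, countLoop_eq]; simp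
  have hkern1 : kern (m : Int) 0 = ((pcN m : Nat) : Int) := by
    have h := kern_eq (pcN m) (bd m).reverse 0 hbin_r hcr
    rw [hler] at h
    simpa using h
  have hkern2 : kern (n2 : Int) 0 = ((pcN n2 : Nat) : Int) := by
    have hbl : IsBin (bd n2) := isBin_bd n2
    have hbr : IsBin (bd n2).reverse := fun c hc => hbl c (List.mem_reverse.mp hc)
    have h := kern_eq (pcN n2) (bd n2).reverse 0 hbr
      (by rw [List.count_reverse, count_bd])
    rw [← parseBin_eq_parseLE, parseBin_bd] at h
    simpa using h
  simp only [minimize_XOR, minimize_XOR_alt, hA1, hA2, hkern1, hkern2, toBinChars_natCast]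
  by_cases heq : pcN m = pcN n2
  · rw [if_pos (by exact_mod_cast heq), heq, sub_self, Int.toNat_zero]
    rfl
  · rw [if_neg (by exact_mod_cast heq)]
    by_cases hc2L : (((bd m).length : Nat) : Int) ≤ ((pcN n2 : Nat) : Int)
    · -- set_bits2 ≥ len(num1_list): A returns int('1'*c2, 2); B fills all zeros then extends
      rw [if_pos hc2L]
      have hLle : (bd m).length ≤ pcN n2 := by exact_mod_cast hc2L
      have hlt : pcN m < pcN n2 := by omega
      have g1 : (((pcN n2 : Nat) : Int) - ((pcN m : Nat) : Int)).toNat = pcN n2 - pcN m := by omega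
      have g2 : (((pcN m : Nat) : Int) - ((pcN n2 : Nat) : Int)).toNat = 0 := by omega
      rw [g1, g2, show ((pcN n2 : Nat) : Int).toNat = pcN n2 by omega]
      have hr1 : bRaise (m : Int) (pcN n2 - pcN m)
          = (parseLE (szoN (bd m).reverse (pcN n2 - pcN m)) : Int) := by
        have h := bRaise_eq (pcN n2 - pcN m) (bd m).reverse hbin_r
        rw [hler] at h
        exact h
      have hs1 : szoN (bd m).reverse ((bd m).length - pcN m)
          = List.replicate (bd m).length '1' := by
        rw [← hzeros, szoN_eq_slz _ _ (le_refl _), slz_all _ hbin_r, List.length_reverse]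
      have hs2 : szoN (bd m).reverse (pcN n2 - pcN m) = List.replicate (pcN n2) '1' := by
        rw [show pcN n2 - pcN m = ((bd m).length - pcN m) + (pcN n2 - (bd m).length) by omega,
            szoN_add, hs1, szoN_replicate]
        congr 1
        omega
      rw [show ∀ x : Int, bLower x 0 = x from fun _ => rfl, hr1, hs2,
          parseBin_eq_parseLE, List.reverse_replicate, parseLE_replicate_one]
    · -- set_bits2 < len(num1_list)
      rw [if_neg hc2L]
      have hc2L' : pcN n2 < (bd m).length := by
        have : ¬ ((bd m).length ≤ pcN n2) := fun h => hc2L (by exact_mod_cast h)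
        omega
      by_cases hlt : pcN n2 < pcN m
      · -- clear bits: pass1 alone vs bLower
        obtain ⟨hp1f, hp1s⟩ := pass1_zlo (bd m) (pcN n2) hbin_l (by omega)
        have g1 : (((pcN n2 : Nat) : Int) - ((pcN m : Nat) : Int)).toNat = 0 := by omega
        have g2 : (((pcN m : Nat) : Int) - ((pcN n2 : Nat) : Int)).toNat = pcN n2 - pcN m + (pcN m - pcN n2) := by omega
        rw [g1, show ∀ x : Int, bRaise x 0 = x from fun _ => rfl]
        rw [show (((pcN m : Nat) : Int) - ((pcN n2 : Nat) : Int)).toNat = pcN m - pcN n2 by omega]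
        have hbl : bLower (m : Int) (pcN m - pcN n2)
            = (parseLE (clrN (bd m).reverse (pcN m - pcN n2)) : Int) := by
          have h := bLower_eq (pcN m - pcN n2) (bd m).reverse hbin_r (by rw [hcr]; omega)
          rw [hler] at h
          exact h
        rw [hbl, if_neg (by rw [hp1s]; exact fun h => h rfl)]
        rw [parseBin_eq_parseLE, hp1f, hcl,
            clrN_eq_zlo _ _ hbin_r (by rw [hcr]; omega)]
      · -- set bits: pass1 (identity) + pass2 vs bRaise
        have hlt2 : pcN m < pcN n2 := by omega
        rw [pass1_all (bd m) _ hbin_l (by rw [hcl]; exact_mod_cast Nat.le_of_lt hlt2)]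
        have hsub : ((pcN n2 : Nat) : Int) - (((bd m).count '1' : Nat) : Int)
            = (((pcN n2 - pcN m : Nat) : Nat) : Int) := by
          rw [hcl]; push_cast; omega
        rw [hsub, if_pos (by push_cast; omega : ¬ (((pcN n2 - pcN m : Nat) : Nat) : Int) = 0)]
        rw [pass2_eq_slz _ _ (by push_cast; omega),
            show (((pcN n2 - pcN m : Nat) : Nat) : Int).toNat = pcN n2 - pcN m by omega]
        rw [← szoN_eq_slz _ _ (by rw [hzeros]; omega)]
        rw [parseBin_eq_parseLE, List.reverse_reverse]
        have g1 : (((pcN n2 : Nat) : Int) - ((pcN m : Nat) : Int)).toNat = pcN n2 - pcN m := by omega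
        have g2 : (((pcN m : Nat) : Int) - ((pcN n2 : Nat) : Int)).toNat = 0 := by omega
        rw [g1, g2, show ∀ x : Int, bLower x 0 = x from fun _ => rfl]
        have h := bRaise_eq (pcN n2 - pcN m) (bd m).reverse hbin_r
        rw [hler] at h
        rw [h]
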